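-- pv_equiv track=rewrite | github.com/chakraa1/Data-Structures-and-Algorithms | Strings/ChangeCharacter.py | ChangeCharacter
-- ===== SOURCE A (Python) =====
-- def ChangeCharacter(A, B):
--     freq =[0]*26
--     for char in A:
--         code = ord(char) - ord('a')
--         freq[code] += 1
--     freq_sorted = sorted(freq)
--
--     for i in range(26):
--         if freq_sorted[i] != 0:
--             if B > 0 and B >= freq_sorted[i]:
--                 B -= freq_sorted[i]
--             else:
--                 return 26-i
--
--     return 0
-- ===== SOURCE B (Python) =====
-- def ChangeCharacter(A, B):
--     freq = [0] * 26
--     for char in A: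
--         freq[ord(char) - ord('a')] += 1
--     # bucket the letter groups by their size (counting-sort style: no comparison sort)
--     buckets = {}
--     distinct = 0
--     for f in freq:
--         if f:
--             distinct += 1
--             buckets[f] = buckets.get(f, 0) + 1
--     # sweep group sizes upward, removing whole batches of equal-sized groups at once
--     removed = 0
--     budget = B
--     for v in range(1, len(A) + 1):
--         if v > budget:
--             break
--         k = buckets.get(v, 0)
--         take = k if k <= budget // v else budget // v
--         removed += take
--         budget -= v * take
--         if take < k:
--             break
--     return distinct - removed
-- ===== Notes on version B (the rewrite author's own statement) =====
-- stated objective: alternative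
-- what changed: Replaces A's comparison-sort-then-greedy scan by a counting-sort-style method: letter groups are bucketed by size into a dict, then group sizes are swept upward from 1, removing each whole batch of equal-sized groups at once via integer division of the remaining budget.
import Mathlib
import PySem

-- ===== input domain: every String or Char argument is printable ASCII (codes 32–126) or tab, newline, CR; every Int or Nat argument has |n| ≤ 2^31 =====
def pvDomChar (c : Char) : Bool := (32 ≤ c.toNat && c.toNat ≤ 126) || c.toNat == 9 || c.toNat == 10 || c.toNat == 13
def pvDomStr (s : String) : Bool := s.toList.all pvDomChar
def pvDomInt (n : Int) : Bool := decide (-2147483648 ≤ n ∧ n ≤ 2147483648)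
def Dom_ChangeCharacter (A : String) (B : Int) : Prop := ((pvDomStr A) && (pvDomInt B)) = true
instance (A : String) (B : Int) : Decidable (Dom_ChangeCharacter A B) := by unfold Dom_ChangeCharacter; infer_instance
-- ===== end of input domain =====

-- B replaces A's sort-then-greedy scan by a counting-sort-style bucket sweep: letter groups
-- are bucketed by size, and group sizes are swept upward removing whole batches by division
-- (alternative decomposition, no comparison sort; same asymptotic cost).

-- ===== PORT A =====
-- counting loop: freq[ord(char)-ord('a')] += 1 (Python indexing: negative codes wrap; out
-- of [-26,25] is IndexError, excluded by Pre_; pyGetD/pySetD are exact under Pre_)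
def pvFreqA (A : String) : List Int :=
  A.toList.foldl
    (fun freq c =>
      let code : Int := (c.toNat : Int) - 97
      PySem.List.pySetD freq code (PySem.List.pyGetD freq code 0 + 1))
    (List.replicate 26 0)

-- for i in range(26): freq_sorted[i] — iterated as structural recursion over the 26-element
-- sorted list itself; the early return 26-i is the length of the remaining suffix (rest.length+1)
def pvGoA : List Int → Int → Int
  | [], _ => 0
  | f :: rest, b =>
      if f ≠ 0 then
        (if b > 0 ∧ b ≥ f then pvGoA rest (b - f) else ((rest.length : Int) + 1))
      else pvGoA rest b

def ChangeCharacter (A : String) (B : Int) : Int :=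
  pvGoA (PySem.List.sorted (pvFreqA A) (fun x => x) false) B

-- ===== PORT B =====
-- same counting loop as Source B's first loop
def pvFreqB (A : String) : List Int :=
  A.toList.foldl
    (fun freq c =>
      let code : Int := (c.toNat : Int) - 97
      PySem.List.pySetD freq code (PySem.List.pyGetD freq code 0 + 1))
    (List.replicate 26 0)

-- for f in freq: if f: distinct += 1; buckets[f] = buckets.get(f, 0) + 1
def pvBucketsB (freq : List Int) : Int × PySem.Dict Int Int :=
  freq.foldl
    (fun st f => if f ≠ 0 then (st.1 + 1, st.2.insert f (st.2.getD f 0 + 1)) else st)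
    (0, PySem.Dict.empty)

-- for v in range(1, len(A)+1): … with the two breaks as early returns
def pvSweep (buckets : PySem.Dict Int Int) : List Int → Int → Int → Int
  | [], _, removed => removed
  | v :: vs, budget, removed =>
      if v > budget then removed
      else
        let k := buckets.getD v 0
        let take := if k ≤ PySem.Int.floordiv budget v then k else PySem.Int.floordiv budget v
        if take < k then removed + take
        else pvSweep buckets vs (budget - v * take) (removed + take)

def ChangeCharacter_alt (A : String) (B : Int) : Int :=
  let freq := pvFreqB A
  let st := pvBucketsB freq
  st.1 - pvSweep st.2 (PySem.List.pyRange 1 (PySem.Str.len A + 1) 1) B 0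

-- ===== PRECONDITION & SPEC =====
-- exactly the inputs where A's counting loop never raises IndexError:
-- every character's code ord(c)-97 must be a valid Python index into the 26-element list
def Pre_ChangeCharacter (A : String) (B : Int) : Prop :=
  A.toList.all (fun c => decide (PySem.Raise.InRange 26 ((c.toNat : Int) - 97))) = true
instance (A : String) (B : Int) : Decidable (Pre_ChangeCharacter A B) := by
  unfold Pre_ChangeCharacter; infer_instance

def pvWitness_ChangeCharacter : String × Int := ("aabbc", 2)

def Spec_ChangeCharacter (A : String) (B : Int) (out : Int) : Prop := out = ChangeCharacter_alt A B
instance (A : String) (B : Int) (out : Int) : Decidable (Spec_ChangeCharacter A B out) := by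
  unfold Spec_ChangeCharacter; infer_instance

-- ===== CLAIM (what is proved, stated in full; the proofs are below) =====
def Claim_equal_ChangeCharacter : Prop := ∀ (A : String) (B : Int), Dom_ChangeCharacter A B → Pre_ChangeCharacter A B → Spec_ChangeCharacter A B (ChangeCharacter A B)

-- ===== LEMMAS AND PROOFS =====

-- proof-only helper: the unit-step greedy count over the sorted group list (the common
-- spec both ports are reduced to): number of leading groups whose cumulative sum fits b
def pvGreedy : List Int → Int → Int → Int → Int
  | [], _, _, removed => removed
  | f :: rest, b, total, removed =>
      if total + f > b then removed else pvGreedy rest b (total + f) (removed + 1)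

-- membership through a Python-indexed set
theorem pv_mem_pySetD {α : Type} (xs : List α) (i : Int) (v x : α)
    (hx : x ∈ PySem.List.pySetD xs i v) : x ∈ xs ∨ x = v := by
  simp only [PySem.List.pySetD, PySem.List.pySet?] at hx
  cases h : PySem.List.pyIdx? xs.length i with
  | none => rw [h] at hx; exact Or.inl (by simpa using hx)
  | some k =>
      rw [h] at hx
      simp only [Option.map_some, Option.getD_some] at hx
      exact List.mem_or_eq_of_mem_set hx

theorem pv_pyGetD_le (xs : List Int) (i : Int) (m : Int) (h0 : 0 ≤ m)
    (h : ∀ y ∈ xs, y ≤ m) : PySem.List.pyGetD xs i 0 ≤ m := by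
  by_cases hir : PySem.Raise.InRange xs.length i
  · exact h _ (PySem.List.pyGetD_mem (xs := xs) (d := (0:Int)) hir)
  · rw [PySem.List.pyGetD_of_none _ _ _ ((PySem.List.pyGet?_eq_none_iff _ _).mpr hir)]; exact h0

theorem pv_pyGetD_nonneg (xs : List Int) (i : Int) (h : ∀ y ∈ xs, 0 ≤ y) :
    0 ≤ PySem.List.pyGetD xs i 0 := by
  by_cases hir : PySem.Raise.InRange xs.length i
  · exact h _ (PySem.List.pyGetD_mem (xs := xs) (d := (0:Int)) hir)
  · rw [PySem.List.pyGetD_of_none _ _ _ ((PySem.List.pyGet?_eq_none_iff _ _).mpr hir)]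

-- every entry of the frequency table is nonnegative
theorem pvFreqA_nonneg (A : String) : ∀ x ∈ pvFreqA A, 0 ≤ x := by
  unfold pvFreqA
  have h : ∀ (l : List Char) (acc : List Int), (∀ x ∈ acc, 0 ≤ x) →
      ∀ x ∈ l.foldl (fun freq c =>
        let code : Int := (c.toNat : Int) - 97
        PySem.List.pySetD freq code (PySem.List.pyGetD freq code 0 + 1)) acc, 0 ≤ x := by
    intro l
    induction l with
    | nil => intro acc hacc; simpa using hacc
    | cons c cs ih =>
        intro acc hacc
        apply ih
        intro x hx
        rcases pv_mem_pySetD _ _ _ _ hx with h1 | h2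
        · exact hacc x h1
        · have := pv_pyGetD_nonneg acc ((c.toNat : Int) - 97) hacc
          omega
  intro x hx
  exact h _ _ (by intro x hx; simp at hx; omega) x hx

-- every entry of the frequency table is at most the number of characters counted
theorem pvFreqA_le (A : String) : ∀ x ∈ pvFreqA A, x ≤ (A.toList.length : Int) := by
  unfold pvFreqA
  have h : ∀ (l : List Char) (acc : List Int) (m : Int), 0 ≤ m → (∀ x ∈ acc, x ≤ m) →
      ∀ x ∈ l.foldl (fun freq c =>
        let code : Int := (c.toNat : Int) - 97
        PySem.List.pySetD freq code (PySem.List.pyGetD freq code 0 + 1)) acc,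
        x ≤ m + (l.length : Int) := by
    intro l
    induction l with
    | nil => intro acc m _ hacc; simpa using hacc
    | cons c cs ih =>
        intro acc m hm hacc x hx
        have step : ∀ y ∈ PySem.List.pySetD acc ((c.toNat : Int) - 97)
            (PySem.List.pyGetD acc ((c.toNat : Int) - 97) 0 + 1), y ≤ m + 1 := by
          intro y hy
          rcases pv_mem_pySetD _ _ _ _ hy with h1 | h2
          · have := hacc y h1; omega
          · have := pv_pyGetD_le acc ((c.toNat : Int) - 97) m hm hacc; omega
        have := ih _ (m + 1) (by omega) step x hx
        simp only [List.length_cons] at *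
        push_cast at *
        omega
  intro x hx
  have := h A.toList (List.replicate 26 0) 0 le_rfl (by intro x hx; simp at hx; omega) x hx
  omega

-- shifting the accumulated total into the budget
theorem pvGreedy_shift (l : List Int) : ∀ (b total removed : Int),
    pvGreedy l b total removed = removed + pvGreedy l (b - total) 0 0 := by
  induction l with
  | nil => intro b total removed; simp [pvGreedy]
  | cons f rest ih =>
      intro b total removed
      simp only [pvGreedy]
      by_cases h : total + f > b
      · rw [if_pos h, if_pos (by omega)]; ring
      · rw [if_neg h, if_neg (by omega : ¬ (0 + f > b - total))]
        rw [ih b (total + f) (removed + 1), ih (b - total) (0 + f) (0 + 1)]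
        have : b - (total + f) = b - total - (0 + f) := by ring
        rw [this]; ring

-- A's early-return loop, on a sorted nonnegative list, equals the greedy prefix count
theorem pvGoA_eq_greedy (l : List Int) : ∀ (b : Int), (∀ x ∈ l, 0 ≤ x) → l.Pairwise (· ≤ ·) →
    pvGoA l b = ((l.filter (fun f => f ≠ 0)).length : Int) - pvGreedy (l.filter (fun f => f ≠ 0)) b 0 0 := by
  induction l with
  | nil => intro b _ _; simp [pvGoA, pvGreedy]
  | cons f rest ih =>
      intro b hnn hp
      have hp' := (List.pairwise_cons.mp hp)
      by_cases hf : f = 0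
      · subst hf
        simp only [pvGoA, ne_eq, not_true_eq_false, if_false, List.filter_cons,
          decide_eq_true_eq]
        simpa using ih b (fun x hx => hnn x (List.mem_cons_of_mem _ hx)) hp'.2
      · have hfpos : 0 < f := lt_of_le_of_ne (hnn f (List.mem_cons_self)) (Ne.symm hf)
        have hrest : rest.filter (fun f => f ≠ 0) = rest := by
          apply List.filter_eq_self.mpr
          intro x hx
          have : f ≤ x := hp'.1 x hx
          simp; omega
        have hfil : (f :: rest).filter (fun f => f ≠ 0) = f :: rest := by
          simp only [List.filter_cons]
          rw [if_pos (by simpa using hf), hrest]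
        rw [hfil]
        simp only [pvGoA, ne_eq, hf, not_false_eq_true, if_true]
        by_cases hb : b > 0 ∧ b ≥ f
        · rw [if_pos hb]
          have ihr := ih (b - f) (fun x hx => hnn x (List.mem_cons_of_mem _ hx)) hp'.2
          rw [hrest] at ihr
          rw [ihr]
          simp only [pvGreedy]
          rw [if_neg (by omega : ¬ (0 + f > b))]
          rw [pvGreedy_shift rest b (0 + f) (0 + 1)]
          have : b - (0 + f) = b - f := by ring
          rw [this]
          simp only [List.length_cons]
          push_cast
          ring
        · rw [if_neg hb]
          simp only [pvGreedy]
          rw [if_pos (by omega : 0 + f > b)]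
          simp only [List.length_cons]
          push_cast
          ring

-- the sorted nonzero groups are the nonzero suffix of A's sorted table
theorem pvGroups_eq (A : String) :
    PySem.List.sorted ((pvFreqA A).filter (fun f => f ≠ 0)) (fun x => x) false
      = (PySem.List.sorted (pvFreqA A) (fun x => x) false).filter (fun f => f ≠ 0) := by
  apply PySem.List.sorted_id_eq_of_perm_of_pairwise
  · exact (PySem.List.sorted_perm (pvFreqA A) (fun x => x) false).filter _
  · exact (PySem.List.sorted_pairwise (pvFreqA A) (fun x => x)).filter _

-- ===== counting-sort characterisation of the sorted nonzero groups =====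

theorem pv_count_flatMap_replicate (c : Int → Nat) :
    ∀ (vs : List Int), vs.Nodup → ∀ (w : Int),
      (vs.flatMap (fun v => List.replicate (c v) v)).count w = if w ∈ vs then c w else 0 := by
  intro vs
  induction vs with
  | nil => intro _ w; simp
  | cons v vs ih =>
      intro hnd w
      have hnd' := List.nodup_cons.mp hnd
      simp only [List.flatMap_cons, List.count_append, List.count_replicate, ih hnd'.2 w,
        List.mem_cons]
      by_cases hw : w = v
      · subst hw
        simp [hnd'.1]
      · have hw' : ¬ v = w := fun h => hw h.symm
        simp [hw, hw']

theorem pv_pairwise_flatMap_replicate (c : Int → Nat) :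
    ∀ (vs : List Int), vs.Pairwise (· < ·) →
      (vs.flatMap (fun v => List.replicate (c v) v)).Pairwise (· ≤ ·) := by
  intro vs
  induction vs with
  | nil => intro _; simp
  | cons v vs ih =>
      intro hp
      have hp' := List.pairwise_cons.mp hp
      rw [List.flatMap_cons, List.pairwise_append]
      refine ⟨List.pairwise_replicate.mpr (by simp), ih hp'.2, ?_⟩
      intro a ha b hb
      have ha' : a = v := List.eq_of_mem_replicate ha
      rcases List.mem_flatMap.mp hb with ⟨u, hu, hbu⟩
      have hb' : b = u := List.eq_of_mem_replicate hbu
      have : v < u := hp'.1 u hu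
      omega

-- sorted(filter ≠0 freq) laid out as concatenated equal-value blocks over range(1, n+1)
theorem pv_sorted_eq_blocks (A : String) :
    PySem.List.sorted ((pvFreqA A).filter (fun f => f ≠ 0)) (fun x => x) false
      = (PySem.List.pyRange 1 ((A.toList.length : Int) + 1) 1).flatMap
          (fun v => List.replicate (((pvFreqA A).filter (fun f => f ≠ 0)).count v) v) := by
  apply PySem.List.sorted_id_eq_of_perm_of_pairwise
  · apply List.perm_iff_count.mpr
    intro w
    rw [pv_count_flatMap_replicate _ _ (PySem.List.pairwise_lt_pyRange_one 1 _ ).nodup w]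
    by_cases hw : w ∈ PySem.List.pyRange 1 ((A.toList.length : Int) + 1) 1
    · rw [if_pos hw]
    · rw [if_neg hw]
      symm
      apply List.count_eq_zero.mpr
      intro hmem
      have h1 : w ∈ (pvFreqA A).filter (fun f => f ≠ 0) := hmem
      have h2 : w ∈ pvFreqA A := List.mem_of_mem_filter h1
      have h3 : w ≠ 0 := by
        have := List.of_mem_filter h1; simpa using this
      have h4 : 0 ≤ w := pvFreqA_nonneg A w h2
      have h5 : w ≤ (A.toList.length : Int) := pvFreqA_le A w h2
      exact hw ((PySem.List.mem_pyRange_one).mpr (by omega))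
  · exact pv_pairwise_flatMap_replicate _ _ (PySem.List.pairwise_lt_pyRange_one 1 _)

-- ===== B's bucket/sweep reduced to the same greedy prefix count =====

-- the single-pass bucket loop splits into the nonzero count and an insert-counter loop
theorem pv_buckets_split (l : List Int) : ∀ (st : Int × PySem.Dict Int Int),
    l.foldl (fun st f => if f ≠ 0 then (st.1 + 1, st.2.insert f (st.2.getD f 0 + 1)) else st) st
      = (st.1 + ((l.countP (fun f => f ≠ 0)) : Int),
         (l.filter (fun f => f ≠ 0)).foldl (fun d f => d.insert f (d.getD f 0 + 1)) st.2) := by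
  induction l with
  | nil => intro st; simp
  | cons f rest ih =>
      intro st
      simp only [List.foldl_cons, List.countP_cons, List.filter_cons]
      by_cases hf : f = 0
      · subst hf
        simp only [ne_eq, not_true_eq_false, if_false, decide_false]
        rw [ih]
        simp
      · simp only [ne_eq, hf, not_false_eq_true, if_true, decide_true]
        rw [ih]
        simp only [List.foldl_cons, Prod.mk.injEq]
        exact ⟨by push_cast; ring, trivial⟩

-- greedy swallows a whole block of k groups of size v when it fits entirely
theorem pvGreedy_replicate (v : Int) (hv : 0 < v) :
    ∀ (k : Nat) (rest : List Int) (b : Int), (k : Int) * v ≤ b →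
      pvGreedy (List.replicate k v ++ rest) b 0 0 = k + pvGreedy rest (b - k * v) 0 0 := by
  intro k
  induction k with
  | zero => intro rest b _; simp
  | succ k ih =>
      intro rest b hb
      have hkv : (0:Int) ≤ (k : Int) * v := mul_nonneg (by positivity) (le_of_lt hv)
      have hvb : v ≤ b := by push_cast at hb; nlinarith
      rw [List.replicate_succ, List.cons_append]
      simp only [pvGreedy]
      rw [if_neg (by omega : ¬ (0 + v > b))]
      rw [pvGreedy_shift _ b (0 + v) (0 + 1)]
      have hb' : (k : Int) * v ≤ b - (0 + v) := by push_cast at hb ⊢; nlinarith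
      rw [ih rest _ hb']
      have : b - (0 + v) - (k : Int) * v = b - ((k : Nat) + 1 : Int) * v := by ring
      rw [this]
      push_cast
      ring

-- greedy stops inside a block when only q of its k groups fit
theorem pvGreedy_replicate_stop (v : Int) (hv : 0 < v) (k q : Nat) (rest : List Int) (b : Int)
    (hq1 : (q : Int) * v ≤ b) (hq2 : b < ((q : Int) + 1) * v) (hqk : q < k) :
    pvGreedy (List.replicate k v ++ rest) b 0 0 = q := by
  have hsplit : List.replicate k v = List.replicate q v ++ List.replicate (k - q) v := by
    rw [← List.replicate_add]
    congr 1
    omega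
  rw [hsplit, List.append_assoc, pvGreedy_replicate v hv q _ b hq1]
  have hkq : k - q = (k - q - 1) + 1 := by omega
  rw [hkq, List.replicate_succ, List.cons_append]
  simp only [pvGreedy]
  rw [if_pos (by nlinarith : 0 + v > b - (q : Int) * v)]
  ring

-- when every remaining group is over budget the greedy count is zero
theorem pvGreedy_nil_of_gt (l : List Int) (b : Int) (h : ∀ w ∈ l, w > b) :
    pvGreedy l b 0 0 = 0 := by
  cases l with
  | nil => rfl
  | cons w rest =>
      simp only [pvGreedy]
      rw [if_pos (by have := h w List.mem_cons_self; omega)]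

-- the bucket sweep computes the greedy prefix count of the concatenated blocks
theorem pv_sweep_eq (buckets : PySem.Dict Int Int) (c : Int → Nat) :
    ∀ (vs : List Int) (b r : Int), (∀ v ∈ vs, 0 < v) → vs.Pairwise (· ≤ ·) →
      (∀ v ∈ vs, buckets.getD v 0 = (c v : Int)) →
      pvSweep buckets vs b r = r + pvGreedy (vs.flatMap (fun v => List.replicate (c v) v)) b 0 0 := by
  intro vs
  induction vs with
  | nil => intro b r _ _ _; simp [pvSweep, pvGreedy]
  | cons v vs ih =>
      intro b r hpos hpw hget
      have hv : 0 < v := hpos v List.mem_cons_self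
      have hk : buckets.getD v 0 = (c v : Int) := hget v List.mem_cons_self
      rw [List.flatMap_cons]
      simp only [pvSweep]
      by_cases hvb : v > b
      · rw [if_pos hvb]
        rw [pvGreedy_nil_of_gt]
        · ring
        · intro w hw
          rcases List.mem_append.mp hw with h1 | h2
          · have := List.eq_of_mem_replicate h1; omega
          · rcases List.mem_flatMap.mp h2 with ⟨u, hu, hwu⟩
            have hw' : w = u := List.eq_of_mem_replicate hwu
            have : v ≤ u := (List.pairwise_cons.mp hpw).1 u hu
            omega
      · rw [if_neg hvb]
        have hb0 : v ≤ b := by omega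
        set qI := PySem.Int.floordiv b v with hqI
        have hqspec : qI * v ≤ b ∧ b < (qI + 1) * v :=
          (PySem.Int.floordiv_eq_iff_of_pos hv).mp hqI.symm
        have hq0 : 0 ≤ qI := by nlinarith [hqspec.1, hqspec.2]
        have ihs : ∀ (b' r' : Int), pvSweep buckets vs b' r'
            = r' + pvGreedy (vs.flatMap (fun v => List.replicate (c v) v)) b' 0 0 :=
          fun b' r' => ih b' r' (fun u hu => hpos u (List.mem_cons_of_mem _ hu))
            (List.pairwise_cons.mp hpw).2 (fun u hu => hget u (List.mem_cons_of_mem _ hu))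
        rw [hk]
        by_cases hkq : (c v : Int) ≤ qI
        · rw [if_pos hkq, if_neg (by omega)]
          rw [ihs]
          have hfit : (c v : Int) * v ≤ b :=
            le_trans (mul_le_mul_of_nonneg_right hkq (le_of_lt hv)) hqspec.1
          rw [pvGreedy_replicate v hv (c v) _ b hfit]
          have : b - v * (c v : Int) = b - (c v : Int) * v := by ring
          rw [this]
          ring
        · rw [if_neg hkq, if_pos (by omega)]
          have hqn : ((qI.toNat : Int)) = qI := Int.toNat_of_nonneg hq0
          rw [pvGreedy_replicate_stop v hv (c v) qI.toNat _ b
            (by rw [hqn]; exact hqspec.1) (by rw [hqn]; exact hqspec.2) (by omega)]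
          omega

-- ===== VERDICT (by name: the statement is the Claim_ definition above) =====
theorem ChangeCharacter_spec : Claim_equal_ChangeCharacter := by
  intro A B _ _
  unfold Spec_ChangeCharacter ChangeCharacter
  have hlen : PySem.Str.len A = (A.toList.length : Int) := by
    simp
  have halt : ChangeCharacter_alt A B
      = (pvBucketsB (pvFreqA A)).1
        - pvSweep (pvBucketsB (pvFreqA A)).2
            (PySem.List.pyRange 1 (PySem.Str.len A + 1) 1) B 0 := rfl
  rw [halt]
  unfold pvBucketsB
  rw [pv_buckets_split]
  dsimp only
  -- A's loop equals |groups| - greedy over the sorted nonzero groups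
  rw [pvGoA_eq_greedy _ B
    (fun x hx => pvFreqA_nonneg A x ((PySem.List.mem_sorted _ _ _ _).mp hx))
    (PySem.List.sorted_pairwise (pvFreqA A) (fun x => x))]
  rw [← pvGroups_eq, PySem.List.length_sorted, pv_sorted_eq_blocks, hlen]
  rw [pv_sweep_eq _ (fun v => ((pvFreqA A).filter (fun f => f ≠ 0)).count v)
        (PySem.List.pyRange 1 ((A.toList.length : Int) + 1) 1) B 0
        (fun v hv => by have := (PySem.List.mem_pyRange_one).mp hv; omega)
        ((PySem.List.pairwise_lt_pyRange_one 1 _).imp le_of_lt)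
        (fun v hv => by
          rw [PySem.Dict.getD_foldl_insert_add_one, PySem.Dict.getD_empty]
          ring)]
  rw [List.countP_eq_length_filter]
  ring
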